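-- pv_equiv track=rewrite | github.com/jkinnunen/nvda-OpenAI | addon/globalPlugins/AIHub/apiclient/_think_tags.py | _split_ollama_think_inline
-- ===== SOURCE A (Python) =====
-- _THINK_TAG_PAIRS: tuple[tuple[str, str], ...] = tuple(
-- 	(o, c) for (o, c) in (
-- 		("<think>", "</think>"),
-- 		("<thinking>", "</thinking>"),
-- 		("<thought>", "</thought>"),
-- 	)
-- 	if o and c
-- )
--
-- def _split_think_pair_inline(
-- 	text: str,
-- 	in_think: bool,
-- 	open_tag: str,
-- 	close_tag: str,
-- ) -> tuple[str, str, bool]: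
-- 	"""Strip ONE tag pair from a fully-known string. Case-insensitive."""
-- 	if not text or not open_tag or not close_tag:
-- 		# Empty tags would deadlock because str.find("", i) always returns i.
-- 		return (text or ""), "", in_think
-- 	resp_parts: list[str] = []
-- 	reasoning_parts: list[str] = []
-- 	lower = text.lower()
-- 	ot_l = open_tag.lower()
-- 	ct_l = close_tag.lower()
-- 	n = len(text)
-- 	i = 0
-- 	while i < n:
-- 		if in_think:
-- 			j = lower.find(ct_l, i)
-- 			if j < 0:
-- 				reasoning_parts.append(text[i:])
-- 				break
-- 			reasoning_parts.append(text[i:j])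
-- 			i = j + len(close_tag)
-- 			in_think = False
-- 		else:
-- 			j = lower.find(ot_l, i)
-- 			if j < 0:
-- 				resp_parts.append(text[i:])
-- 				break
-- 			resp_parts.append(text[i:j])
-- 			i = j + len(open_tag)
-- 			in_think = True
-- 	return "".join(resp_parts), "".join(reasoning_parts), in_think
--
-- def _split_ollama_think_inline(text: str, in_think: bool = False) -> tuple[str, str, bool]:
-- 	"""Apply every known tag pair to a fully-known string (used by non-streaming parsers)."""
-- 	visible = text or ""
-- 	reasoning_all: list[str] = []
-- 	for open_tag, close_tag in _THINK_TAG_PAIRS: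
-- 		if not open_tag or not close_tag:
-- 			continue
-- 		visible, chunk, _flag = _split_think_pair_inline(visible, False, open_tag, close_tag)
-- 		if chunk:
-- 			reasoning_all.append(chunk)
-- 	return visible, "".join(reasoning_all), in_think
-- ===== SOURCE B (Python) =====
-- _THINK_TAG_PAIRS: tuple[tuple[str, str], ...] = (
-- 	("<think>", "</think>"),
-- 	("<thinking>", "</thinking>"),
-- 	("<thought>", "</thought>"),
-- )
--
-- def _strip_pair(text: str, open_tag: str, close_tag: str) -> tuple[str, str]:
-- 	"""Single left-to-right character walk: recognise the (nonempty) tags with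
-- 	startswith on the lowercased text, routing each character to visible or
-- 	reasoning according to the current side of the tag boundary."""
-- 	visible: list[str] = []
-- 	reasoning: list[str] = []
-- 	low = text.lower()
-- 	ot = open_tag.lower()
-- 	ct = close_tag.lower()
-- 	i = 0
-- 	inside = False
-- 	while i < len(text):
-- 		tag = ct if inside else ot
-- 		if low.startswith(tag, i):
-- 			i += len(tag)
-- 			inside = not inside
-- 		else:
-- 			(reasoning if inside else visible).append(text[i])
-- 			i += 1
-- 	return "".join(visible), "".join(reasoning)
--
-- def _split_ollama_think_inline(text: str, in_think: bool = False) -> tuple[str, str, bool]: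
-- 	visible = text or ""
-- 	visible, r1 = _strip_pair(visible, "<think>", "</think>")
-- 	visible, r2 = _strip_pair(visible, "<thinking>", "</thinking>")
-- 	visible, r3 = _strip_pair(visible, "<thought>", "</thought>")
-- 	return visible, r1 + r2 + r3, in_think
-- ===== Notes on version B (the rewrite author's own statement) =====
-- stated objective: alternative
-- what changed: The per-pair str.find index/state machine (jumping between find(open) and find(close)) is replaced by a single left-to-right character walk that recognises the tags with startswith on the lowercased text and routes each character to visible or reasoning, with the three fixed tag pairs applied as an unrolled sequence instead of a filtered loop.
import Mathlib
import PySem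

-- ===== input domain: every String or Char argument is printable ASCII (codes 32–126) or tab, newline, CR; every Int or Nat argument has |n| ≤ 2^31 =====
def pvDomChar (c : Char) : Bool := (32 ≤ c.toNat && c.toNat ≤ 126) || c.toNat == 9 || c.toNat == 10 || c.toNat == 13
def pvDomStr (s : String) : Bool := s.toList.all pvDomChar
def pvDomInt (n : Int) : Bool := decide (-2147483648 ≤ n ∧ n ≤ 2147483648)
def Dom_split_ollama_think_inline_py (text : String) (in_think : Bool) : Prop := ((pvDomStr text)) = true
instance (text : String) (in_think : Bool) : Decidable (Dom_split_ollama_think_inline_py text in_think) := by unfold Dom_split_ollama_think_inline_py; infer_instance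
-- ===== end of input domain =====

-- B replaces A's str.find-based index/state machine (per tag pair) by a single left-to-right
-- character walk recognising the tags with startswith; objective: alternative (same cost).

-- ===== PORT A =====
-- The while-loop of _split_think_pair_inline. State: index i, in_think flag, the two part
-- accumulators (joined parts kept directly as List Char).  The outer dite is only a
-- termination guard (Python's empty-tag guard makes it unreachable; lower preserves length).
-- text[i:j] is (text.drop i).take (j - i) (= PySem.List.slice, slice_natCast); lower.find(tag, i)
-- is PySem.Chars.findFrom; i advances by len(tag) = len(lowered tag).
def pvALoop (text lower otl ctl : List Char) (i : Nat) (inl : Bool)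
    (resp reas : List Char) : List Char × List Char × Bool :=
  if hg : otl = [] ∨ ctl = [] ∨ lower.length ≠ text.length then (resp, reas, inl)
  else if h : i < text.length then
    if inl then
      if hj : PySem.Chars.findFrom lower ctl (i : Int) < 0 then
        (resp, reas ++ text.drop i, true)
      else
        pvALoop text lower otl ctl ((PySem.Chars.findFrom lower ctl (i : Int)).toNat + ctl.length)
          false resp (reas ++ (text.drop i).take ((PySem.Chars.findFrom lower ctl (i : Int)).toNat - i))
    else
      if hj : PySem.Chars.findFrom lower otl (i : Int) < 0 then
        (resp ++ text.drop i, reas, false)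
      else
        pvALoop text lower otl ctl ((PySem.Chars.findFrom lower otl (i : Int)).toNat + otl.length)
          true (resp ++ (text.drop i).take ((PySem.Chars.findFrom lower otl (i : Int)).toNat - i)) reas
  else (resp, reas, inl)
termination_by text.length - i
decreasing_by
  · push_neg at hg
    have hi : i ≤ lower.length := by omega
    have hne : PySem.Chars.findFrom lower ctl (i : Int) ≠ -1 := by omega
    obtain ⟨h1, -, -⟩ := PySem.Chars.findFrom_natCast_spec lower ctl i hi hne
    have hlp : 0 < ctl.length := List.length_pos_iff.mpr hg.2.1
    omega
  · push_neg at hg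
    have hi : i ≤ lower.length := by omega
    have hne : PySem.Chars.findFrom lower otl (i : Int) ≠ -1 := by omega
    obtain ⟨h1, -, -⟩ := PySem.Chars.findFrom_natCast_spec lower otl i hi hne
    have hlp : 0 < otl.length := List.length_pos_iff.mpr hg.1
    omega

-- _split_think_pair_inline: the guard chain 'not text or not open_tag or not close_tag', then the loop.
def pvAPair (text : List Char) (inl : Bool) (ot ct : List Char) : List Char × List Char × Bool :=
  if text = [] then (text, [], inl)
  else if ot = [] then (text, [], inl)
  else if ct = [] then (text, [], inl)
  else pvALoop text (PySem.Chars.lower text) (PySem.Chars.lower ot) (PySem.Chars.lower ct) 0 inl [] []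

-- _split_ollama_think_inline: fold over _THINK_TAG_PAIRS (all three pairs pass the 'if o and c'
-- filter); 'visible = text or ""' is 'text' for a str; reasoning_all joined as it accumulates.
def split_ollama_think_inline_py (text : String) (in_think : Bool) : String × String × Bool :=
  let pairs : List (List Char × List Char) :=
    [("<think>".toList, "</think>".toList),
     ("<thinking>".toList, "</thinking>".toList),
     ("<thought>".toList, "</thought>".toList)]
  let st := pairs.foldl
    (fun (st : List Char × List Char) p =>
      if p.1 = [] ∨ p.2 = [] then st
      else
        let out := pvAPair st.1 false p.1 p.2
        (out.1, if out.2.1 = [] then st.2 else st.2 ++ out.2.1))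
    (text.toList, [])
  (String.ofList st.1, String.ofList st.2, in_think)

-- ===== PORT B =====
-- Source B's _strip_pair loop: walk the text character by character (suffix representation of the
-- Python index i), recognising the current tag with startswith on the lowercased text.  The
-- outer dite is only a termination guard (the three literal tags are nonempty).
def pvBLoop (tr lr otl ctl : List Char) (inside : Bool) (vis reas : List Char) : List Char × List Char :=
  if hg : otl = [] ∨ ctl = [] then (vis, reas)
  else if htr : tr = [] then (vis, reas)
  else
    -- tag = ct if inside else ot (inlined)
    if PySem.Chars.startswith lr (if inside then ctl else otl) then
      pvBLoop (tr.drop (if inside then ctl else otl).length)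
        (lr.drop (if inside then ctl else otl).length) otl ctl (!inside) vis reas
    else if inside then
      pvBLoop tr.tail lr.tail otl ctl inside vis (reas ++ tr.take 1)
    else
      pvBLoop tr.tail lr.tail otl ctl inside (vis ++ tr.take 1) reas
termination_by tr.length
decreasing_by
  · push_neg at hg
    have h1 : 0 < tr.length := List.length_pos_iff.mpr htr
    have h2 : 0 < (if _h : inside = true then ctl else otl).length := by
      cases inside <;> simp [List.length_pos_iff, hg.1, hg.2]
    simp only [List.length_drop]; omega
  · have h1 : 0 < tr.length := List.length_pos_iff.mpr htr
    simp only [List.length_tail]; omega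
  · have h1 : 0 < tr.length := List.length_pos_iff.mpr htr
    simp only [List.length_tail]; omega

-- Source B's _strip_pair: lowercase once, then the walk.
def pvBPair (text ot ct : List Char) : List Char × List Char :=
  pvBLoop text (PySem.Chars.lower text) (PySem.Chars.lower ot) (PySem.Chars.lower ct) false [] []

-- Source B's _split_ollama_think_inline: the three fixed pairs applied in sequence.
def split_ollama_think_inline_py_alt (text : String) (in_think : Bool) : String × String × Bool :=
  let p1 := pvBPair text.toList "<think>".toList "</think>".toList
  let p2 := pvBPair p1.1 "<thinking>".toList "</thinking>".toList
  let p3 := pvBPair p2.1 "<thought>".toList "</thought>".toList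
  (String.ofList p3.1, String.ofList (p1.2 ++ p2.2 ++ p3.2), in_think)

-- ===== PRECONDITION & SPEC =====
def Spec_split_ollama_think_inline_py (text : String) (in_think : Bool) (out : String × String × Bool) : Prop := out = split_ollama_think_inline_py_alt text in_think
instance (text : String) (in_think : Bool) (out : String × String × Bool) : Decidable (Spec_split_ollama_think_inline_py text in_think out) := by unfold Spec_split_ollama_think_inline_py; infer_instance

-- ===== CLAIM (what is proved, stated in full; the proofs are below) =====
def Claim_equal_split_ollama_think_inline_py : Prop := ∀ (text : String) (in_think : Bool), Dom_split_ollama_think_inline_py text in_think → Spec_split_ollama_think_inline_py text in_think (split_ollama_think_inline_py text in_think)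

-- ===== LEMMAS AND PROOFS =====

theorem pvBLoop_acc (n : Nat) : ∀ (tr lr otl ctl : List Char) (inside : Bool) (vis reas : List Char),
    tr.length ≤ n →
    pvBLoop tr lr otl ctl inside vis reas =
      (vis ++ (pvBLoop tr lr otl ctl inside [] []).1,
       reas ++ (pvBLoop tr lr otl ctl inside [] []).2) := by
  induction n with
  | zero =>
    intro tr lr otl ctl inside vis reas h
    have htr : tr = [] := List.length_eq_zero_iff.mp (Nat.le_zero.mp h)
    subst htr
    rw [pvBLoop.eq_def]
    conv_rhs => rw [pvBLoop.eq_def]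
    split_ifs <;> simp_all
  | succ n ih =>
    intro tr lr otl ctl inside vis reas h
    by_cases hg : otl = [] ∨ ctl = []
    · rw [pvBLoop.eq_def]
      conv_rhs => rw [pvBLoop.eq_def]
      simp [hg]
    by_cases htr : tr = []
    · subst htr
      rw [pvBLoop.eq_def]
      conv_rhs => rw [pvBLoop.eq_def]
      split_ifs <;> simp_all
    rw [pvBLoop.eq_def]
    conv_rhs => rw [pvBLoop.eq_def]
    simp only [dif_neg hg, dif_neg htr]
    by_cases hs : PySem.Chars.startswith lr (if inside = true then ctl else otl) = true
    · simp only [if_pos hs]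
      have hlen : (tr.drop (if inside = true then ctl else otl).length).length ≤ n := by
        have h2 : 0 < (if inside = true then ctl else otl).length := by
          push_neg at hg
          cases inside <;> simp [List.length_pos_iff, hg.1, hg.2]
        have h1 : 0 < tr.length := List.length_pos_iff.mpr htr
        simp only [List.length_drop]; omega
      rw [ih _ _ _ _ _ vis reas hlen]
    · simp only [if_neg hs]
      have hlen : tr.tail.length ≤ n := by
        have h1 : 0 < tr.length := List.length_pos_iff.mpr htr
        simp only [List.length_tail]; omega
      by_cases hin : inside = true
      · simp only [if_pos hin]
        rw [ih _ _ _ _ _ vis (reas ++ tr.take 1) hlen, ih _ _ _ _ _ [] ([] ++ tr.take 1) hlen]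
        simp
      · simp only [if_neg hin]
        rw [ih _ _ _ _ _ (vis ++ tr.take 1) reas hlen, ih _ _ _ _ _ ([] ++ tr.take 1) [] hlen]
        simp

theorem pvBLoop_no_match (tr : List Char) : ∀ (lr otl ctl : List Char) (inside : Bool),
    otl ≠ [] → ctl ≠ [] → lr.length = tr.length →
    (∀ m, ¬ (if inside then ctl else otl) <+: lr.drop m) →
    pvBLoop tr lr otl ctl inside [] [] = (if inside then ([], tr) else (tr, [])) := by
  induction tr with
  | nil =>
    intro lr otl ctl inside hot hct hlen hnm
    rw [pvBLoop.eq_def]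
    split_ifs <;> simp_all
  | cons c tr ih =>
    intro lr otl ctl inside hot hct hlen hnm
    have hs : PySem.Chars.startswith lr (if inside = true then ctl else otl) = false := by
      have := hnm 0
      simp only [List.drop_zero] at this
      cases hb : PySem.Chars.startswith lr (if inside = true then ctl else otl)
      · rfl
      · exact absurd (PySem.Chars.startswith_iff lr _ |>.mp hb) this
    rw [pvBLoop.eq_def]
    simp only [dif_neg (show ¬(otl = [] ∨ ctl = []) by simp [hot, hct]),
      dif_neg (show ¬(c :: tr = []) by simp), hs, Bool.false_eq_true, if_false]
    have hnm' : ∀ m, ¬ (if inside then ctl else otl) <+: lr.tail.drop m := by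
      intro m
      rw [List.drop_tail]
      exact hnm (m + 1)
    have hlen' : lr.tail.length = tr.length := by
      simp only [List.length_tail, hlen, List.length_cons]; omega
    cases hin : inside
    · simp only [Bool.false_eq_true, if_false, List.tail_cons, List.take_succ_cons, List.take_zero]
      rw [pvBLoop_acc tr.length tr lr.tail otl ctl false ([] ++ [c]) [] (by simp)]
      have := ih lr.tail otl ctl false hot hct hlen' (by intro m; have h5 := hnm' m; simp_all)
      simp [this]
    · simp only [if_true, List.tail_cons, List.take_succ_cons, List.take_zero]
      rw [pvBLoop_acc tr.length tr lr.tail otl ctl true [] ([] ++ [c]) (by simp)]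
      have := ih lr.tail otl ctl true hot hct hlen' (by intro m; have h5 := hnm' m; simp_all)
      simp [this]

theorem pvBLoop_match (k : Nat) : ∀ (tr lr otl ctl : List Char) (inside : Bool),
    otl ≠ [] → ctl ≠ [] → lr.length = tr.length →
    (∀ m < k, ¬ (if inside then ctl else otl) <+: lr.drop m) →
    ((if inside then ctl else otl) <+: lr.drop k) →
    pvBLoop tr lr otl ctl inside [] [] =
      (let rest := pvBLoop (tr.drop (k + (if inside then ctl else otl).length))
                           (lr.drop (k + (if inside then ctl else otl).length)) otl ctl (!inside) [] []
       if inside then (rest.1, tr.take k ++ rest.2) else (tr.take k ++ rest.1, rest.2)) := by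
  induction k with
  | zero =>
    intro tr lr otl ctl inside hot hct hlen hmin hk
    simp only [List.drop_zero] at hk
    have hs : PySem.Chars.startswith lr (if inside = true then ctl else otl) = true :=
      (PySem.Chars.startswith_iff lr _).mpr hk
    have htag : 0 < (if inside = true then ctl else otl).length := by
      cases inside <;> simp [List.length_pos_iff, hot, hct]
    have htr : tr ≠ [] := by
      intro hnil
      have h6 := hk.length_le
      rw [hnil, List.length_nil] at hlen
      omega
    rw [pvBLoop.eq_def]
    simp only [dif_neg (show ¬(otl = [] ∨ ctl = []) by simp [hot, hct]), dif_neg htr, hs, if_true]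
    cases inside <;> simp
  | succ k ih =>
    intro tr lr otl ctl inside hot hct hlen hmin hk
    have hs : PySem.Chars.startswith lr (if inside = true then ctl else otl) = false := by
      have h0 := hmin 0 (Nat.succ_pos k)
      simp only [List.drop_zero] at h0
      cases hb : PySem.Chars.startswith lr (if inside = true then ctl else otl)
      · rfl
      · exact absurd (PySem.Chars.startswith_iff lr _ |>.mp hb) h0
    obtain ⟨c, tr, rfl⟩ : ∃ c tr', tr = c :: tr' := by
      cases tr
      · exfalso
        have := hk.length_le
        have htag : 0 < (if inside = true then ctl else otl).length := by
          cases inside <;> simp [List.length_pos_iff, hot, hct]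
        simp only [List.length_nil] at hlen
        simp only [List.length_drop, hlen] at this
        omega
      · exact ⟨_, _, rfl⟩
    have hmin' : ∀ m < k, ¬ (if inside = true then ctl else otl) <+: lr.tail.drop m := by
      intro m hm
      rw [List.drop_tail]
      exact hmin (m + 1) (by omega)
    have hk' : (if inside = true then ctl else otl) <+: lr.tail.drop k := by
      rw [List.drop_tail]; exact hk
    have hlen' : lr.tail.length = tr.length := by
      simp only [List.length_tail, hlen, List.length_cons]; omega
    rw [pvBLoop.eq_def]
    simp only [dif_neg (show ¬(otl = [] ∨ ctl = []) by simp [hot, hct]),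
      dif_neg (show ¬(c :: tr = []) by simp), hs, Bool.false_eq_true, if_false,
      List.tail_cons, List.take_succ_cons]
    have hrec := ih tr lr.tail otl ctl inside hot hct hlen' (by intro m hm; have := hmin' m hm; simp_all) (by simpa using hk')
    cases hin : inside
    · simp only [Bool.false_eq_true, if_false]
      rw [pvBLoop_acc tr.length tr lr.tail otl ctl false ([] ++ c :: List.take 0 tr) [] (by simp)]
      rw [hin] at hrec
      simp only [Bool.false_eq_true, if_false] at hrec
      rw [hrec]
      have e1 : k + 1 + otl.length = (k + otl.length) + 1 := by omega
      simp only [e1, List.drop_succ_cons, List.take_succ_cons, ← List.drop_tail]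
      simp
    · simp only [if_true]
      rw [pvBLoop_acc tr.length tr lr.tail otl ctl true [] ([] ++ c :: List.take 0 tr) (by simp)]
      rw [hin] at hrec
      simp only [if_true] at hrec
      rw [hrec]
      have e1 : k + 1 + ctl.length = (k + ctl.length) + 1 := by omega
      simp only [e1, List.drop_succ_cons, List.take_succ_cons, ← List.drop_tail]
      simp

theorem pvALoop_eq (text otl ctl : List Char) (hot : otl ≠ []) (hct : ctl ≠ []) :
    ∀ (n i : Nat) (inl : Bool) (resp reas : List Char), i ≤ text.length → text.length - i ≤ n →
    ((pvALoop text (PySem.Chars.lower text) otl ctl i inl resp reas).1,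
     (pvALoop text (PySem.Chars.lower text) otl ctl i inl resp reas).2.1)
      = (resp ++ (pvBLoop (text.drop i) ((PySem.Chars.lower text).drop i) otl ctl inl [] []).1,
         reas ++ (pvBLoop (text.drop i) ((PySem.Chars.lower text).drop i) otl ctl inl [] []).2) := by
  have hlen : (PySem.Chars.lower text).length = text.length := by simp [PySem.Chars.lower]
  intro n
  induction n with
  | zero =>
    intro i inl resp reas hi hn
    have hi' : i = text.length := by omega
    subst hi'
    rw [pvALoop.eq_def]
    simp only [dif_neg (show ¬(otl = [] ∨ ctl = [] ∨ (PySem.Chars.lower text).length ≠ text.length)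
      by simp [hot, hct, hlen]), lt_irrefl, dite_false]
    rw [pvBLoop.eq_def]
    simp [hot, hct]
  | succ n ih =>
    intro i inl resp reas hi hn
    by_cases h : i < text.length
    · rw [pvALoop.eq_def]
      simp only [dif_neg (show ¬(otl = [] ∨ ctl = [] ∨ (PySem.Chars.lower text).length ≠ text.length)
        by simp [hot, hct, hlen]), dif_pos h]
      have hilow : i ≤ (PySem.Chars.lower text).length := by omega
      have hlend : ((PySem.Chars.lower text).drop i).length = (text.drop i).length := by
        simp [hlen]
      cases inl
      · -- in_think = False: search for the open tag
        simp only [Bool.false_eq_true, if_false]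
        rw [PySem.Chars.findFrom_natCast (PySem.Chars.lower text) otl i hilow]
        by_cases hfneg : PySem.Chars.find ((PySem.Chars.lower text).drop i) otl = -1
        · simp only [hfneg, if_pos rfl]
          have hnm : ∀ m, ¬ otl <+: ((PySem.Chars.lower text).drop i).drop m := by
            intro m hpre
            exact (PySem.Chars.find_eq_neg_one_iff _ _ |>.mp hfneg)
              (hpre.isInfix.trans (List.drop_suffix m _).isInfix)
          rw [pvBLoop_no_match (text.drop i) ((PySem.Chars.lower text).drop i) otl ctl false
            hot hct hlend (by simpa using hnm)]
          simp
        · have hge : 0 ≤ PySem.Chars.find ((PySem.Chars.lower text).drop i) otl := by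
            have := PySem.Chars.neg_one_le_find ((PySem.Chars.lower text).drop i) otl
            omega
          simp only [if_neg hfneg]
          set f := PySem.Chars.find ((PySem.Chars.lower text).drop i) otl with hfdef
          have hcond : ¬ ((i : Int) + f < 0) := by omega
          simp only [dif_neg hcond]
          obtain ⟨hpre, hmin⟩ := PySem.Chars.find_spec (s := (PySem.Chars.lower text).drop i) (sub := otl) hge
          have hfnat : ((i : Int) + f).toNat = i + f.toNat := by omega
          have hsub : otl.length ≤ ((PySem.Chars.lower text).drop i).length - f.toNat := by
            have h1 := hpre.length_le
            simp only [List.length_drop] at h1 ⊢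
            omega
          have hop : 0 < otl.length := List.length_pos_iff.mpr hot
          have hi2 : i + f.toNat + otl.length ≤ text.length := by
            simp only [List.length_drop, hlen] at hsub
            omega
          rw [pvBLoop_match f.toNat (text.drop i) ((PySem.Chars.lower text).drop i) otl ctl false
            hot hct hlend (by simpa using hmin) (by simpa using hpre)]
          have ihe := ih (i + f.toNat + otl.length) true
            (resp ++ (text.drop i).take (((i : Int) + f).toNat - i)) reas (by omega) (by omega)
          have e1 : ((i : Int) + f).toNat + otl.length = i + f.toNat + otl.length := by omega
          rw [e1, ihe]
          have e2 : (text.drop i).drop (f.toNat + otl.length) = text.drop (i + f.toNat + otl.length) := by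
            rw [List.drop_drop]; ring_nf
          have e3 : ((PySem.Chars.lower text).drop i).drop (f.toNat + otl.length)
              = (PySem.Chars.lower text).drop (i + f.toNat + otl.length) := by
            rw [List.drop_drop]; ring_nf
          have e4 : ((i : Int) + f).toNat - i = f.toNat := by omega
          simp only [e2, e3, e4, Bool.not_false]
          simp [List.append_assoc, Nat.add_assoc]
      · -- in_think = True: search for the close tag
        simp only [if_true]
        rw [PySem.Chars.findFrom_natCast (PySem.Chars.lower text) ctl i hilow]
        by_cases hfneg : PySem.Chars.find ((PySem.Chars.lower text).drop i) ctl = -1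
        · simp only [hfneg, if_pos rfl]
          have hnm : ∀ m, ¬ ctl <+: ((PySem.Chars.lower text).drop i).drop m := by
            intro m hpre
            exact (PySem.Chars.find_eq_neg_one_iff _ _ |>.mp hfneg)
              (hpre.isInfix.trans (List.drop_suffix m _).isInfix)
          rw [pvBLoop_no_match (text.drop i) ((PySem.Chars.lower text).drop i) otl ctl true
            hot hct hlend (by simpa using hnm)]
          simp
        · have hge : 0 ≤ PySem.Chars.find ((PySem.Chars.lower text).drop i) ctl := by
            have := PySem.Chars.neg_one_le_find ((PySem.Chars.lower text).drop i) ctl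
            omega
          simp only [if_neg hfneg]
          set f := PySem.Chars.find ((PySem.Chars.lower text).drop i) ctl with hfdef
          have hcond : ¬ ((i : Int) + f < 0) := by omega
          simp only [dif_neg hcond]
          obtain ⟨hpre, hmin⟩ := PySem.Chars.find_spec (s := (PySem.Chars.lower text).drop i) (sub := ctl) hge
          have hfnat : ((i : Int) + f).toNat = i + f.toNat := by omega
          have hsub : ctl.length ≤ ((PySem.Chars.lower text).drop i).length - f.toNat := by
            have h1 := hpre.length_le
            simp only [List.length_drop] at h1 ⊢
            omega
          have hop : 0 < ctl.length := List.length_pos_iff.mpr hct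
          have hi2 : i + f.toNat + ctl.length ≤ text.length := by
            simp only [List.length_drop, hlen] at hsub
            omega
          rw [pvBLoop_match f.toNat (text.drop i) ((PySem.Chars.lower text).drop i) otl ctl true
            hot hct hlend (by simpa using hmin) (by simpa using hpre)]
          have ihe := ih (i + f.toNat + ctl.length) false
            resp (reas ++ (text.drop i).take (((i : Int) + f).toNat - i)) (by omega) (by omega)
          have e1 : ((i : Int) + f).toNat + ctl.length = i + f.toNat + ctl.length := by omega
          rw [e1, ihe]
          have e2 : (text.drop i).drop (f.toNat + ctl.length) = text.drop (i + f.toNat + ctl.length) := by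
            rw [List.drop_drop]; ring_nf
          have e3 : ((PySem.Chars.lower text).drop i).drop (f.toNat + ctl.length)
              = (PySem.Chars.lower text).drop (i + f.toNat + ctl.length) := by
            rw [List.drop_drop]; ring_nf
          have e4 : ((i : Int) + f).toNat - i = f.toNat := by omega
          simp only [e2, e3, e4, Bool.not_true]
          simp [List.append_assoc, Nat.add_assoc]
    · rw [pvALoop.eq_def]
      simp only [dif_neg (show ¬(otl = [] ∨ ctl = [] ∨ (PySem.Chars.lower text).length ≠ text.length)
        by simp [hot, hct, hlen]), dif_neg h]
      have hdrop : text.drop i = [] := by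
        apply List.drop_eq_nil_of_le
        omega
      rw [hdrop, pvBLoop.eq_def]
      simp [hot, hct]

theorem pvAPair_eq (text ot ct : List Char) (hot : ot ≠ []) (hct : ct ≠ []) :
    ((pvAPair text false ot ct).1, (pvAPair text false ot ct).2.1) = pvBPair text ot ct := by
  have hot' : PySem.Chars.lower ot ≠ [] := by simp [PySem.Chars.lower, hot]
  have hct' : PySem.Chars.lower ct ≠ [] := by simp [PySem.Chars.lower, hct]
  unfold pvAPair pvBPair
  by_cases htext : text = []
  · subst htext
    rw [pvBLoop.eq_def]
    simp [hot, hct, hot', hct']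
  · simp only [if_neg htext, if_neg hot, if_neg hct]
    have := pvALoop_eq text (PySem.Chars.lower ot) (PySem.Chars.lower ct) hot' hct'
      text.length 0 false [] [] (by omega) (by omega)
    simpa using this

theorem app_if (acc r : List Char) : (if r = [] then acc else acc ++ r) = acc ++ r := by
  split_ifs with h
  · simp [h]
  · rfl


-- ===== VERDICT (by name: the statement is the Claim_ definition above) =====
theorem split_ollama_think_inline_py_spec : Claim_equal_split_ollama_think_inline_py := by
  intro text in_think _
  unfold Spec_split_ollama_think_inline_py
  unfold split_ollama_think_inline_py split_ollama_think_inline_py_alt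
  simp only [List.foldl_cons, List.foldl_nil]
  rw [if_neg (by decide), if_neg (by decide), if_neg (by decide)]
  simp only [app_if]
  have e1 := pvAPair_eq text.toList "<think>".toList "</think>".toList (by decide) (by decide)
  have e2 := pvAPair_eq (pvBPair text.toList "<think>".toList "</think>".toList).1
    "<thinking>".toList "</thinking>".toList (by decide) (by decide)
  have e3 := pvAPair_eq (pvBPair (pvBPair text.toList "<think>".toList "</think>".toList).1
      "<thinking>".toList "</thinking>".toList).1
    "<thought>".toList "</thought>".toList (by decide) (by decide)
  have e11 := congrArg Prod.fst e1
  have e12 := congrArg Prod.snd e1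
  simp only at e11 e12
  rw [e11, e12]
  have e21 := congrArg Prod.fst e2
  have e22 := congrArg Prod.snd e2
  simp only at e21 e22
  rw [e21, e22]
  have e31 := congrArg Prod.fst e3
  have e32 := congrArg Prod.snd e3
  simp only at e31 e32
  rw [e31, e32]
  simp [List.append_assoc]
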